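-- pv_equiv track=rewrite | github.com/sdesbure/bifrost-kolla | filter_plugins/ip_settings.py | job2nodes
-- ===== SOURCE A (Python) =====
-- def job2nodes(pod):
--     jobs = {'controller': [],
--             'compute': [],
--             'storage': [],
--             'network': []}
--     for srv in sorted(pod['nodes']):
--         for job in pod['nodes'][srv]:
--             jobs[job].append(srv)
--     return jobs
-- ===== SOURCE B (Python) =====
-- def job2nodes(pod):
--     nodes = pod['nodes']
--     order = sorted(nodes)
--     return {job: [s for s in order for j in nodes[s] if j == job]
--             for job in ('controller', 'compute', 'storage', 'network')}
-- ===== Notes on version B (the rewrite author's own statement) =====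
-- stated objective: simpler
-- what changed: B replaces A's single distributing pass that appends into a pre-built four-key dict with a per-category dict comprehension: it sorts the server names once and then scans them once per job category, collecting matching servers directly.
import Mathlib
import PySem

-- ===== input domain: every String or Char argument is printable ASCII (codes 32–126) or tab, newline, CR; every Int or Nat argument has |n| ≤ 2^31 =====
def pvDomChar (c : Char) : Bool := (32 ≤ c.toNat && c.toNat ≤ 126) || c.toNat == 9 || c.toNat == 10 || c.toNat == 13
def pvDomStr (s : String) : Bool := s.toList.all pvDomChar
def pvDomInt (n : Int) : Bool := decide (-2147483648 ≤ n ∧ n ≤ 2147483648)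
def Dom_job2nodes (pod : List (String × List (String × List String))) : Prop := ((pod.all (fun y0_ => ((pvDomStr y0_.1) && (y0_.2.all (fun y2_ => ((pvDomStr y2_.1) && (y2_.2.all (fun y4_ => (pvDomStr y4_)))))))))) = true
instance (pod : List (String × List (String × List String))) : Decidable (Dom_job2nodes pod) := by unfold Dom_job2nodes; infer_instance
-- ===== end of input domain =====

-- B groups the sorted server names with one per-category scan per job (a dict
-- comprehension over the four fixed categories) instead of A's single
-- distributing pass that appends into a pre-built four-key dict. Same cost class.

-- ===== PORT A =====
def job2nodes (pod : List (String × List (String × List String))) : List (String × List String) :=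
  let jobs : PySem.Dict String (List String) :=
    PySem.Dict.mk [("controller", []), ("compute", []), ("storage", []), ("network", [])]
  let nodes : List (String × List String) := PySem.Dict.getD (PySem.Dict.mk pod) "nodes" []
  let final :=
    (PySem.List.sorted (nodes.map Prod.fst) (fun s => s) false).foldl
      (fun jobs srv =>
        (PySem.Dict.getD (PySem.Dict.mk nodes) srv []).foldl
          (fun jobs job => PySem.Dict.modify jobs job [] (fun l => l ++ [srv])) jobs)
      jobs
  final.items

-- ===== PORT B =====
def job2nodes_alt (pod : List (String × List (String × List String))) : List (String × List String) :=
  let nodes : List (String × List String) := PySem.Dict.getD (PySem.Dict.mk pod) "nodes" []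
  let order := PySem.List.sorted (nodes.map Prod.fst) (fun s => s) false
  ["controller", "compute", "storage", "network"].map (fun job =>
    (job, order.flatMap (fun s =>
      (PySem.Dict.getD (PySem.Dict.mk nodes) s []).filterMap
        (fun j => if j == job then some s else none))))

-- ===== PRECONDITION & SPEC =====
-- Pre_ = exactly the inputs on which Python A returns: the 'nodes' key is present
-- and every listed job is one of the four known categories (otherwise A raises KeyError).
def Pre_job2nodes (pod : List (String × List (String × List String))) : Prop :=
  (PySem.Dict.mk pod).contains "nodes" = true ∧
  ∀ p ∈ PySem.Dict.getD (PySem.Dict.mk pod) "nodes" ([] : List (String × List String)),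
    ∀ j ∈ p.2, j ∈ ["controller", "compute", "storage", "network"]
instance (pod : List (String × List (String × List String))) : Decidable (Pre_job2nodes pod) := by
  unfold Pre_job2nodes; infer_instance

def pvWitness_job2nodes : (List (String × List (String × List String))) :=
  [("nodes", [("b", ["compute", "controller"]), ("a", ["compute"])])]

def Spec_job2nodes (pod : List (String × List (String × List String))) (out : List (String × List String)) : Prop := out = job2nodes_alt pod
instance (pod : List (String × List (String × List String))) (out : List (String × List String)) : Decidable (Spec_job2nodes pod out) := by unfold Spec_job2nodes; infer_instance

-- ===== CLAIM (what is proved, stated in full; the proofs are below) =====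
def Claim_equal_job2nodes : Prop := ∀ (pod : List (String × List (String × List String))), Dom_job2nodes pod → Pre_job2nodes pod → Spec_job2nodes pod (job2nodes pod)

-- ===== LEMMAS AND PROOFS =====

-- the per-category selector B applies to one server
def pvPick (nodes : List (String × List String)) (job : String) : String → List String :=
  fun s =>
    (PySem.Dict.getD (PySem.Dict.mk nodes) s []).filterMap (fun j => if j == job then some s else none)

-- pod['nodes'][s] is [] or the (first-match) value of some pair of the list
lemma getD_mk_cases (l : List (String × List String)) (s : String) :
    PySem.Dict.getD (PySem.Dict.mk l) s [] = [] ∨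
    ∃ p ∈ l, PySem.Dict.getD (PySem.Dict.mk l) s [] = p.2 := by
  induction l with
  | nil => left; rfl
  | cons p t ih =>
    by_cases h : (p.1 == s) = true
    · right
      refine ⟨p, List.mem_cons_self .., ?_⟩
      rw [PySem.Dict.getD_eq_get?_getD, PySem.Dict.get?_mk_cons, if_pos h]
      rfl
    · have heq : PySem.Dict.getD (PySem.Dict.mk (p :: t)) s ([] : List String)
          = PySem.Dict.getD (PySem.Dict.mk t) s [] := by
        rw [PySem.Dict.getD_eq_get?_getD, PySem.Dict.get?_mk_cons, if_neg h,
          PySem.Dict.getD_eq_get?_getD]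
      rw [heq]
      rcases ih with h' | ⟨q, hq, h'⟩
      · exact Or.inl h'
      · exact Or.inr ⟨q, List.mem_cons_of_mem _ hq, h'⟩

-- one Dict.modify step on the four-key state, per key (kernel-reducible)
lemma mq_controller (f : List String → List String) (a b c d : List String) :
    PySem.Dict.modify (PySem.Dict.mk [("controller", a), ("compute", b), ("storage", c), ("network", d)]) "controller" [] f
    = PySem.Dict.mk [("controller", f a), ("compute", b), ("storage", c), ("network", d)] := rfl

lemma mq_compute (f : List String → List String) (a b c d : List String) :
    PySem.Dict.modify (PySem.Dict.mk [("controller", a), ("compute", b), ("storage", c), ("network", d)]) "compute" [] f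
    = PySem.Dict.mk [("controller", a), ("compute", f b), ("storage", c), ("network", d)] := rfl

lemma mq_storage (f : List String → List String) (a b c d : List String) :
    PySem.Dict.modify (PySem.Dict.mk [("controller", a), ("compute", b), ("storage", c), ("network", d)]) "storage" [] f
    = PySem.Dict.mk [("controller", a), ("compute", b), ("storage", f c), ("network", d)] := rfl

lemma mq_network (f : List String → List String) (a b c d : List String) :
    PySem.Dict.modify (PySem.Dict.mk [("controller", a), ("compute", b), ("storage", c), ("network", d)]) "network" [] f
    = PySem.Dict.mk [("controller", a), ("compute", b), ("storage", c), ("network", f d)] := rfl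

-- one server's inner job loop, on a state of the invariant shape
lemma inner_fold (srv : String) (jl : List String)
    (h : ∀ j ∈ jl, j ∈ ["controller", "compute", "storage", "network"])
    (a b c d : List String) :
    jl.foldl (fun st job => PySem.Dict.modify st job [] (fun l => l ++ [srv]))
      (PySem.Dict.mk [("controller", a), ("compute", b), ("storage", c), ("network", d)])
    = PySem.Dict.mk
        [("controller", a ++ jl.filterMap (fun j => if j == "controller" then some srv else none)),
         ("compute",    b ++ jl.filterMap (fun j => if j == "compute"    then some srv else none)),
         ("storage",    c ++ jl.filterMap (fun j => if j == "storage"    then some srv else none)),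
         ("network",    d ++ jl.filterMap (fun j => if j == "network"    then some srv else none))] := by
  induction jl generalizing a b c d with
  | nil => simp
  | cons j rest ih =>
    have hj := h j (by simp)
    have hrest : ∀ j' ∈ rest, j' ∈ ["controller", "compute", "storage", "network"] :=
      fun j' hj' => h j' (by simp [hj'])
    simp only [List.mem_cons, List.not_mem_nil, or_false] at hj
    rcases hj with rfl | rfl | rfl | rfl
    · rw [List.foldl_cons, mq_controller, ih hrest]
      simp [List.append_assoc]
    · rw [List.foldl_cons, mq_compute, ih hrest]
      simp [List.append_assoc]
    · rw [List.foldl_cons, mq_storage, ih hrest]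
      simp [List.append_assoc]
    · rw [List.foldl_cons, mq_network, ih hrest]
      simp [List.append_assoc]

-- the whole outer server loop, on a state of the invariant shape
lemma outer_fold (nodes : List (String × List String)) (srvs : List String)
    (h : ∀ s, ∀ j ∈ PySem.Dict.getD (PySem.Dict.mk nodes) s ([] : List String),
           j ∈ ["controller", "compute", "storage", "network"])
    (a b c d : List String) :
    srvs.foldl
      (fun jobs srv =>
        (PySem.Dict.getD (PySem.Dict.mk nodes) srv []).foldl
          (fun jobs job => PySem.Dict.modify jobs job [] (fun l => l ++ [srv])) jobs)
      (PySem.Dict.mk [("controller", a), ("compute", b), ("storage", c), ("network", d)])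
    = PySem.Dict.mk
        [("controller", a ++ srvs.flatMap (pvPick nodes "controller")),
         ("compute",    b ++ srvs.flatMap (pvPick nodes "compute")),
         ("storage",    c ++ srvs.flatMap (pvPick nodes "storage")),
         ("network",    d ++ srvs.flatMap (pvPick nodes "network"))] := by
  induction srvs generalizing a b c d with
  | nil => simp
  | cons s rest ih =>
    rw [List.foldl_cons, inner_fold s _ (h s), ih]
    simp [pvPick, List.flatMap_cons, List.append_assoc]

-- ===== VERDICT (by name: the statement is the Claim_ definition above) =====
theorem job2nodes_spec : Claim_equal_job2nodes := by
  intro pod _ hpre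
  obtain ⟨-, hjobs⟩ := hpre
  unfold Spec_job2nodes job2nodes job2nodes_alt
  dsimp only
  set nodes := PySem.Dict.getD (PySem.Dict.mk pod) "nodes" ([] : List (String × List String)) with hn
  have h : ∀ s, ∀ j ∈ PySem.Dict.getD (PySem.Dict.mk nodes) s ([] : List String),
      j ∈ ["controller", "compute", "storage", "network"] := by
    intro s j hj
    rcases getD_mk_cases nodes s with he | ⟨p, hp, he⟩
    · rw [he] at hj; simp at hj
    · rw [he] at hj; exact hjobs p hp j hj
  rw [outer_fold nodes _ h]
  rfl
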